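-- pv_equiv track=rewrite | github.com/DominikLudwiczak/master-thesis | orchestrator/agent.py | _smart_truncate_readme
-- ===== SOURCE A (Python) =====
-- def _smart_truncate_readme(readme: str, max_chars: int) -> str:
--     if len(readme) <= max_chars:
--         return readme
--     priority_keywords = ["install", "usage", "run", "experiment", "reproduc", "requirement", "setup"]
--     lines = readme.splitlines()
--     scored, current_section, score = [], [], 0
--     for line in lines:
--         low = line.lower()
--         if low.startswith("#"):
--             if current_section:
--                 scored.append((score, "\n".join(current_section)))
--             current_section, score = [line], sum(k in low for k in priority_keywords)
--         else:
--             current_section.append(line)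
--     if current_section:
--         scored.append((score, "\n".join(current_section)))
--     scored.sort(key=lambda x: -x[0])
--     result = ""
--     for _, section in scored:
--         if len(result) + len(section) > max_chars:
--             break
--         result += section + "\n\n"
--     return result or readme[:max_chars]
-- ===== SOURCE B (Python) =====
-- KEYWORDS = ["install", "usage", "run", "experiment", "reproduc", "requirement", "setup"]
--
--
-- def _kw_score(line):
--     low = line.lower()
--     if not low.startswith("#"):
--         return 0
--     return sum(k in low for k in KEYWORDS)
--
--
-- def _smart_truncate_readme(readme: str, max_chars: int) -> str:
--     if len(readme) <= max_chars:
--         return readme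
--     lines = readme.splitlines()
--     if not lines:
--         return readme[:max_chars]
--     # Stage 1: heading marks (index, line); a pseudo-mark at 0 covers the preamble.
--     marks = [(i, line) for i, line in enumerate(lines) if line.lower().startswith("#")]
--     if not marks or marks[0][0] > 0:
--         marks = [(0, lines[0])] + marks
--     bounds = [i for i, _ in marks[1:]] + [len(lines)]
--     # Stage 2: sections as slices between consecutive marks.
--     pairs = [(_kw_score(line), "\n".join(lines[a:b])) for (a, line), b in zip(marks, bounds)]
--     # Stage 3: counting order — sweep the 8 possible score levels 7..0; no sort needed.
--     ordered = [t for s in range(7, -1, -1) for sc, t in pairs if sc == s]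
--     # Stage 4: count how many sections fit (each kept section costs len + 2), then join once.
--     used, cut = 0, 0
--     for t in ordered:
--         if used + len(t) > max_chars:
--             break
--         used += len(t) + 2
--         cut += 1
--     return "".join(t + "\n\n" for t in ordered[:cut]) or readme[:max_chars]
-- ===== Notes on version B (the rewrite author's own statement) =====
-- stated objective: alternative
-- what changed: B builds sections by a staged index pass (enumerate heading positions, zip with the next boundary, slice lines[a:b]) instead of A's running current_section accumulator, eliminates the sort entirely by a counting sweep over the 8 possible score levels 7..0, and selects by counting how many sections fit before joining once, instead of A's grow-a-string break loop.
import Mathlib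
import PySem

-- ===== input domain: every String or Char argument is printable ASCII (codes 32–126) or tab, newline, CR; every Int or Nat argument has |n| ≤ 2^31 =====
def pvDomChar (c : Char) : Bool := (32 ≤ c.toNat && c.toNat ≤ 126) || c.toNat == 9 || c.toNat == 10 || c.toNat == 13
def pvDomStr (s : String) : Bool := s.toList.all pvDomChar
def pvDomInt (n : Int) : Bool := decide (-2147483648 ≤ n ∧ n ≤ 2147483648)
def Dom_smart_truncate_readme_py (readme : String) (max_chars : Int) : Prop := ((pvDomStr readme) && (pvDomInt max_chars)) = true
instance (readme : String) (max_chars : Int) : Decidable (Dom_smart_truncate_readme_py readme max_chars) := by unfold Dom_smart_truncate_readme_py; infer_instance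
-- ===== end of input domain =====

-- B rebuilds the truncation in stages: heading positions + slices instead of A's running
-- accumulator, a counting sweep over the 8 possible score levels instead of A's sort, and a
-- count-how-many-fit pass instead of A's grow-a-string break loop (objective: alternative).

-- ===== PORT A =====
-- priority_keywords
def pvPriorityKeywords : List String :=
  ["install", "usage", "run", "experiment", "reproduc", "requirement", "setup"]

-- the body of A's `for line in lines` loop; state = (scored, current_section, score)
def pvStepA (st : List (Int × String) × List String × Int) (line : String) :
    List (Int × String) × List String × Int :=
  let low := PySem.Str.lower line
  if PySem.Str.startswith low "#" then
    let scored := if st.2.1 ≠ [] then st.1 ++ [(st.2.2, PySem.Str.join "\n" st.2.1)] else st.1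
    (scored, [line],
      (pvPriorityKeywords.map (fun k => if PySem.Str.isIn k low then (1 : Int) else 0)).sum)
  else
    (st.1, st.2.1 ++ [line], st.2.2)

-- A's second loop: grow `result`, break at the first section that would overflow
def pvSelA (m : Int) : List (Int × String) → String → String
  | [], r => r
  | p :: t, r =>
    if PySem.Str.len r + PySem.Str.len p.2 > m then r
    else pvSelA m t (r ++ p.2 ++ "\n\n")

def smart_truncate_readme_py (readme : String) (max_chars : Int) : String :=
  if PySem.Str.len readme ≤ max_chars then readme
  else
    let lines := PySem.Str.splitlines readme
    let st := lines.foldl pvStepA ([], [], 0)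
    let scored := if st.2.1 ≠ [] then st.1 ++ [(st.2.2, PySem.Str.join "\n" st.2.1)] else st.1
    let sortedScored := PySem.List.sorted scored (fun x => -x.1) false
    let result := pvSelA max_chars sortedScored ""
    -- `result or readme[:max_chars]` (a str is falsy iff empty)
    if result = "" then PySem.Str.slice readme none (some max_chars) else result

-- ===== PORT B =====
def pvKeywords : List String :=
  ["install", "usage", "run", "experiment", "reproduc", "requirement", "setup"]

-- _kw_score
def pvKwScore (line : String) : Int :=
  let low := PySem.Str.lower line
  if ¬ PySem.Str.startswith low "#" then 0
  else (pvKeywords.map (fun k => if PySem.Str.isIn k low then (1 : Int) else 0)).sum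

-- B's stage-4 loop (`for t in ordered: … break`), counting accepted sections;
-- `used` is the running cost, the result is `cut`
def pvCutB (m : Int) : List String → Int → Int
  | [], _ => 0
  | t :: ts, used =>
    if used + PySem.Str.len t > m then 0
    else 1 + pvCutB m ts (used + PySem.Str.len t + 2)

def smart_truncate_readme_py_alt (readme : String) (max_chars : Int) : String :=
  if PySem.Str.len readme ≤ max_chars then readme
  else
    let lines := PySem.Str.splitlines readme
    if lines = [] then PySem.Str.slice readme none (some max_chars)
    else
      -- Stage 1: marks = [(i, line) for i, line in enumerate(lines) if line.lower().startswith("#")]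
      let marks := (PySem.List.enumerate lines 0).filter
        (fun p => PySem.Str.startswith (PySem.Str.lower p.2) "#")
      -- `if not marks or marks[0][0] > 0:` prepend the preamble pseudo-mark (0, lines[0])
      let needPre : Bool := match marks with | [] => true | m :: _ => decide (0 < m.1)
      -- lines[0]: total here since lines ≠ []
      let marks' := if needPre then ((0 : Int), (PySem.List.pyGet? lines 0).getD "") :: marks else marks
      let bounds := marks'.tail.map Prod.fst ++ [(lines.length : Int)]
      -- Stage 2: sections as slices lines[a:b] between consecutive marks
      let pairs := (marks'.zip bounds).map
        (fun mb => (pvKwScore mb.1.2, PySem.Str.join "\n" (PySem.List.slice lines (some mb.1.1) (some mb.2))))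
      -- Stage 3: counting order over score levels 7..0 (range(7, -1, -1)); no sort
      let ordered := (PySem.List.pyRange 7 (-1) (-1)).flatMap
        (fun s => (pairs.filter (fun p => decide (p.1 = s))).map Prod.snd)
      -- Stage 4: count how many sections fit, then join once
      let cut := pvCutB max_chars ordered 0
      let joined := PySem.Str.join "" ((PySem.List.slice ordered none (some cut)).map (fun t => t ++ "\n\n"))
      if joined = "" then PySem.Str.slice readme none (some max_chars) else joined

-- ===== PRECONDITION & SPEC =====
def Spec_smart_truncate_readme_py (readme : String) (max_chars : Int) (out : String) : Prop := out = smart_truncate_readme_py_alt readme max_chars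
instance (readme : String) (max_chars : Int) (out : String) : Decidable (Spec_smart_truncate_readme_py readme max_chars out) := by unfold Spec_smart_truncate_readme_py; infer_instance

-- ===== CLAIM (what is proved, stated in full; the proofs are below) =====
def Claim_equal_smart_truncate_readme_py : Prop := ∀ (readme : String) (max_chars : Int), Dom_smart_truncate_readme_py readme max_chars → Spec_smart_truncate_readme_py readme max_chars (smart_truncate_readme_py readme max_chars)

-- ===== LEMMAS AND PROOFS =====

-- a heading line
def pvIsHead (line : String) : Bool := PySem.Str.startswith (PySem.Str.lower line) "#"

-- foldr (cons) formulation of the heading-grouping: (.1 = heading sections in order, .2 = preamble)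
def pvGB (l : List String) : List (List String) × List String :=
  l.foldr (fun line st => if pvIsHead line then ((line :: st.2) :: st.1, []) else (st.1, line :: st.2)) ([], [])

-- (score, text) of a possibly-empty section-in-progress, as A emits it
def pvPre (c : List String) (s : Int) : List (Int × String) :=
  if c = [] then [] else [(s, PySem.Str.join "\n" c)]

def pvPair (sec : List String) : Int × String := (pvKwScore (sec.headD ""), PySem.Str.join "\n" sec)

-- A's finalization of the loop state
def pvFinish (st : List (Int × String) × List String × Int) : List (Int × String) :=
  if st.2.1 ≠ [] then st.1 ++ [(st.2.2, PySem.Str.join "\n" st.2.1)] else st.1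

-- "".join(t + "\n\n" for t in picked)
def pvCat (picked : List String) : String :=
  PySem.Str.join "" (picked.map (fun t => t ++ "\n\n"))

-- B-side abbreviations used by the proofs
def pvMarks (l : List String) : List (Int × String) :=
  (PySem.List.enumerate l 0).filter (fun p => PySem.Str.startswith (PySem.Str.lower p.2) "#")

def pvShift (ms : List (Int × String)) : List (Int × String) := ms.map (fun p => (p.1 + 1, p.2))

def pvBounds (ms : List (Int × String)) (n : Int) : List Int := ms.tail.map Prod.fst ++ [n]

def pvHsec (l : List String) : List (String × List String) :=
  ((pvMarks l).zip (pvBounds (pvMarks l) (l.length : Int))).map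
    (fun mb => (mb.1.2, PySem.List.slice l (some mb.1.1) (some mb.2)))

def pvFirstIdx (l : List String) : Int :=
  match pvMarks l with | [] => (l.length : Int) | m :: _ => m.1

def pvBefore (a b : Int × String) : Bool := decide (-a.1 < -b.1)

def pvBk (ks : List Int) (l : List (Int × String)) : List (Int × String) :=
  ks.flatMap (fun s => l.filter (fun p => decide (p.1 = s)))

theorem pvGB_cons (line : String) (t : List String) :
    pvGB (line :: t) = if pvIsHead line then ((line :: (pvGB t).2) :: (pvGB t).1, [])
      else ((pvGB t).1, line :: (pvGB t).2) := rfl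

theorem pvGB_tail_no_head (l : List String) : ∀ line ∈ (pvGB l).2, pvIsHead line = false := by
  induction l with
  | nil => intro line h; simp [pvGB] at h
  | cons x t ih =>
    intro line h
    rw [pvGB_cons] at h
    by_cases hx : pvIsHead x
    · simp [hx] at h
    · simp [hx] at h
      rcases h with rfl | h
      · simpa using hx
      · exact ih line h

-- A's grouping loop, finalized, equals the carry-prefixed grouping
theorem pvFoldA_eq (l : List String) : ∀ (scored : List (Int × String)) (c : List String) (s : Int),
    pvFinish (l.foldl pvStepA (scored, c, s)) =
      scored ++ pvPre (c ++ (pvGB l).2) s ++ ((pvGB l).1.map pvPair) := by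
  induction l with
  | nil =>
    intro scored c s
    by_cases hc : c = [] <;> simp [pvFinish, pvPre, pvGB, hc]
  | cons line t ih =>
    intro scored c s
    rw [List.foldl_cons]
    by_cases hh : pvIsHead line
    · have h' : PySem.Chars.startswith (PySem.Chars.lower line.toList) ['#'] = true := by
        simpa [pvIsHead] using hh
      have hstep : pvStepA (scored, c, s) line =
          (scored ++ pvPre c s, [line],
            (pvPriorityKeywords.map
              (fun k => if PySem.Str.isIn k (PySem.Str.lower line) then (1 : Int) else 0)).sum) := by
        by_cases hc : c = [] <;> simp [pvStepA, pvPre, h', hc]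
      rw [hstep, ih, pvGB_cons, if_pos hh]
      have hpair : pvPre ([line] ++ (pvGB t).2)
            ((pvPriorityKeywords.map
              (fun k => if PySem.Str.isIn k (PySem.Str.lower line) then (1 : Int) else 0)).sum) =
          [pvPair (line :: (pvGB t).2)] := by
        simp [pvPre, pvPair, pvKwScore, pvKeywords, pvPriorityKeywords, h']
      rw [hpair]
      simp [List.append_assoc]
    · have h' : PySem.Chars.startswith (PySem.Chars.lower line.toList) ['#'] = false := by
        simpa [pvIsHead] using hh
      have hstep : pvStepA (scored, c, s) line = (scored, c ++ [line], s) := by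
        simp [pvStepA, h']
      rw [hstep, ih, pvGB_cons, if_neg hh]
      simp [List.append_assoc]

theorem pvScored_eq (l : List String) :
    pvFinish (l.foldl pvStepA ([], [], 0)) =
      ((if (pvGB l).2 ≠ [] then (pvGB l).2 :: (pvGB l).1 else (pvGB l).1).map pvPair) := by
  rw [pvFoldA_eq l [] [] 0]
  by_cases ht : (pvGB l).2 = []
  · simp [ht, pvPre]
  · obtain ⟨h0, t0, hcons⟩ : ∃ h0 t0, (pvGB l).2 = h0 :: t0 := by
      cases hgb : (pvGB l).2 with
      | nil => exact absurd hgb ht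
      | cons a b => exact ⟨a, b, rfl⟩
    have hnh : PySem.Chars.startswith (PySem.Chars.lower h0.toList) ['#'] = false := by
      have := pvGB_tail_no_head l h0 (by rw [hcons]; simp)
      simpa [pvIsHead] using this
    have hz : pvKwScore h0 = 0 := by simp [pvKwScore, hnh]
    simp [hcons, pvPre, pvPair, hz]


-- B's stage-1/2 pipeline (marks → bounds → slice pairs), as the port computes it
def pvNeedPre : List (Int × String) → Bool
  | [] => true
  | m :: _ => decide (0 < m.1)

def pvPairsOf (lines : List String) : List (Int × String) :=
  let marks := pvMarks lines
  let marks' := if pvNeedPre marks then ((0 : Int), (PySem.List.pyGet? lines 0).getD "") :: marks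
    else marks
  (marks'.zip (pvBounds marks' (lines.length : Int))).map
    (fun mb => (pvKwScore mb.1.2, PySem.Str.join "\n" (PySem.List.slice lines (some mb.1.1) (some mb.2))))

theorem pvInsertBy_cons {α : Type} (f : α → α → Bool) (x y : α) (ys : List α) :
    PySem.List.insertBy f x (y :: ys) =
      if f x y then x :: y :: ys else y :: PySem.List.insertBy f x ys := rfl

theorem pvInsertBy_append {α : Type} (f : α → α → Bool) (x : α) (as bs : List α)
    (h : ∀ y ∈ as, f x y = false) :
    PySem.List.insertBy f x (as ++ bs) = as ++ PySem.List.insertBy f x bs := by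
  induction as with
  | nil => rfl
  | cons a as ih =>
    rw [List.cons_append, pvInsertBy_cons, if_neg (by simp [h a (by simp)]), List.cons_append]
    rw [ih (fun y hy => h y (by simp [hy]))]

theorem pvInsertBy_front {α : Type} (f : α → α → Bool) (x : α) (bs : List α)
    (h : ∀ y ∈ bs, f x y = true) :
    PySem.List.insertBy f x bs = x :: bs := by
  cases bs with
  | nil => rfl
  | cons b bs => rw [pvInsertBy_cons, if_pos (h b (by simp))]

theorem pvBk_key_mem (ks : List Int) (l : List (Int × String)) :
    ∀ q ∈ pvBk ks l, q.1 ∈ ks := by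
  intro q hq
  unfold pvBk at hq
  rw [List.mem_flatMap] at hq
  obtain ⟨s, hs, hq⟩ := hq
  have := List.mem_filter.mp hq
  have := of_decide_eq_true this.2
  rwa [this]

theorem pvBk_cons (k : Int) (ks : List Int) (l : List (Int × String)) :
    pvBk (k :: ks) l = l.filter (fun q => decide (q.1 = k)) ++ pvBk ks l := by
  simp [pvBk]

theorem pvBk_append_single (ks : List Int) (l : List (Int × String)) (p : Int × String)
    (h : p.1 ∉ ks) : pvBk ks (l ++ [p]) = pvBk ks l := by
  unfold pvBk
  induction ks with
  | nil => rfl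
  | cons k ks ih =>
    rw [List.flatMap_cons, List.flatMap_cons, List.filter_append,
      ih (fun hm => h (by simp [hm]))]
    have : (([p] : List (Int × String)).filter (fun q => decide (q.1 = k))) = [] := by
      simp only [List.filter_cons, List.filter_nil]
      rw [if_neg]
      simp only [decide_eq_true_eq]
      intro hk; exact h (by simp [hk])
    rw [this, List.append_nil]

theorem pvBkInsert (ks : List Int) (hks : ks.Pairwise (fun a b => b < a))
    (l : List (Int × String)) (p : Int × String) (hp : p.1 ∈ ks) :
    PySem.List.insertBy pvBefore p (pvBk ks l) = pvBk ks (l ++ [p]) := by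
  induction ks generalizing l with
  | nil => simp at hp
  | cons k ks ih =>
    rw [List.pairwise_cons] at hks
    obtain ⟨hk, hks'⟩ := hks
    rw [pvBk_cons, pvBk_cons]
    by_cases hpk : p.1 = k
    · have hF : ∀ y ∈ l.filter (fun q => decide (q.1 = k)), pvBefore p y = false := by
        intro y hy
        have := of_decide_eq_true (List.mem_filter.mp hy).2
        simp only [pvBefore, decide_eq_false_iff_not]
        omega
      rw [pvInsertBy_append _ _ _ _ hF]
      have hR : ∀ y ∈ pvBk ks l, pvBefore p y = true := by
        intro y hy
        have hmem := pvBk_key_mem ks l y hy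
        have := hk _ hmem
        simp only [pvBefore, decide_eq_true_eq]
        omega
      rw [pvInsertBy_front _ _ _ hR]
      rw [List.filter_append]
      have hone : (([p] : List (Int × String)).filter (fun q => decide (q.1 = k))) = [p] := by
        simp [hpk]
      rw [hone]
      have hks2 : pvBk ks (l ++ [p]) = pvBk ks l :=
        pvBk_append_single ks l p (fun hm => by have := hk _ hm; omega)
      rw [hks2]
      simp
    · have hp' : p.1 ∈ ks := by
        rcases List.mem_cons.mp hp with h | h
        · exact absurd h hpk
        · exact h
      have hF : ∀ y ∈ l.filter (fun q => decide (q.1 = k)), pvBefore p y = false := by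
        intro y hy
        have hy1 := of_decide_eq_true (List.mem_filter.mp hy).2
        have : p.1 < k := hk _ hp'
        simp only [pvBefore, decide_eq_false_iff_not]
        omega
      rw [pvInsertBy_append _ _ _ _ hF, ih hks' l hp']
      rw [List.filter_append]
      have hone : (([p] : List (Int × String)).filter (fun q => decide (q.1 = k))) = [] := by
        simp [hpk]
      rw [hone, List.append_nil]

theorem pvSorted_eq_bk (ks : List Int) (hks : ks.Pairwise (fun a b => b < a))
    (l : List (Int × String)) (h : ∀ p ∈ l, p.1 ∈ ks) :
    PySem.List.sorted l (fun x => -x.1) false = pvBk ks l := by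
  have haux : ∀ (l2 l1 : List (Int × String)), (∀ q ∈ l2, q.1 ∈ ks) →
      l2.foldl (fun acc x => PySem.List.insertBy pvBefore x acc) (pvBk ks l1) = pvBk ks (l1 ++ l2) := by
    intro l2
    induction l2 with
    | nil => intro l1 _; simp
    | cons p l2 ih =>
      intro l1 hq
      rw [List.foldl_cons, pvBkInsert ks hks l1 p (hq p (by simp))]
      have hrec := ih (l1 ++ [p]) (fun q hqq => hq q (by simp [hqq]))
      rw [hrec, List.append_assoc]
      rfl
  show List.foldl (fun acc x => PySem.List.insertBy pvBefore x acc) [] l = pvBk ks l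
  have h0 : pvBk ks [] = [] := by simp [pvBk]
  have hm := haux l [] h
  rw [h0, List.nil_append] at hm
  exact hm

theorem pvSum01_bound (ws : List String) (low : String) :
    0 ≤ (ws.map (fun k => if PySem.Str.isIn k low then (1 : Int) else 0)).sum ∧
      (ws.map (fun k => if PySem.Str.isIn k low then (1 : Int) else 0)).sum ≤ ws.length := by
  induction ws with
  | nil => simp
  | cons w ws ih =>
    rw [List.map_cons, List.sum_cons, List.length_cons]
    push_cast
    by_cases hw : PySem.Str.isIn w low <;> simp only [hw, if_true] <;> omega

theorem pvKwScore_mem (line : String) : pvKwScore line ∈ ([7, 6, 5, 4, 3, 2, 1, 0] : List Int) := by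
  have hb := pvSum01_bound pvKeywords (PySem.Str.lower line)
  have hlen : (pvKeywords.length : Int) = 7 := by decide
  rw [hlen] at hb
  unfold pvKwScore
  simp only [List.mem_cons]
  by_cases hh : PySem.Str.startswith (PySem.Str.lower line) "#"
  · rw [if_neg (by simpa using hh)]
    omega
  · rw [if_pos (by simpa using hh)]
    omega

theorem pvEnum_shift (l : List String) : ∀ a : Int,
    PySem.List.enumerate l (a + 1) = (PySem.List.enumerate l a).map (fun p => (p.1 + 1, p.2)) := by
  induction l with
  | nil => intro a; simp [PySem.List.enumerate_nil]
  | cons x t ih =>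
    intro a
    rw [PySem.List.enumerate_cons, PySem.List.enumerate_cons, List.map_cons, ih (a + 1)]

theorem pvMarks_cons (x : String) (t : List String) :
    pvMarks (x :: t) = (if pvIsHead x then [((0 : Int), x)] else []) ++ pvShift (pvMarks t) := by
  unfold pvMarks pvShift
  rw [PySem.List.enumerate_cons, List.filter_cons, pvEnum_shift t 0, List.filter_map]
  have hcomp : ((fun p : Int × String => PySem.Str.startswith (PySem.Str.lower p.2) "#") ∘
      (fun p : Int × String => (p.1 + 1, p.2))) =
      (fun p : Int × String => PySem.Str.startswith (PySem.Str.lower p.2) "#") := rfl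
  rw [hcomp]
  by_cases hx : pvIsHead x
  · rw [if_pos (by simpa [pvIsHead] using hx), if_pos hx]
    rfl
  · rw [if_neg (by simpa [pvIsHead] using hx), if_neg hx, List.nil_append]

theorem pvMarks_natIdx (l : List String) : ∀ p ∈ pvMarks l, ∃ k : Nat, p.1 = (k : Int) := by
  intro p hp
  unfold pvMarks at hp
  have hmem := (List.mem_filter.mp hp).1
  rw [PySem.List.mem_enumerate_iff] at hmem
  obtain ⟨k, hk, rfl⟩ := hmem
  exact ⟨k, by simp⟩

theorem pvFirstIdx_nat (l : List String) : ∃ k : Nat, pvFirstIdx l = (k : Int) := by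
  unfold pvFirstIdx
  cases h : pvMarks l with
  | nil => exact ⟨l.length, rfl⟩
  | cons m mr =>
    obtain ⟨k, hk⟩ := pvMarks_natIdx l m (by rw [h]; simp)
    exact ⟨k, hk⟩

theorem pvSliceZero (x : String) (t : List String) (k : Nat) :
    PySem.List.slice (x :: t) (some 0) (some ((k : Int) + 1)) =
      x :: PySem.List.slice t (some 0) (some (k : Int)) := by
  rw [show ((k : Int) + 1) = ((k + 1 : Nat) : Int) by push_cast; ring]
  simp only [PySem.List.slice_zero_start, PySem.List.slice_to_natCast]
  rw [List.take_succ_cons]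

theorem pvSliceCons (x : String) (t : List String) (k j : Nat) :
    PySem.List.slice (x :: t) (some ((k : Int) + 1)) (some ((j : Int) + 1)) =
      PySem.List.slice t (some (k : Int)) (some (j : Int)) := by
  rw [show ((k : Int) + 1) = ((k + 1 : Nat) : Int) by push_cast; ring,
    show ((j : Int) + 1) = ((j + 1 : Nat) : Int) by push_cast; ring]
  rw [PySem.List.slice_natCast, PySem.List.slice_natCast, List.drop_succ_cons]
  congr 1
  omega

theorem pvLpre (l : List String) :
    PySem.List.slice l (some 0) (some (pvFirstIdx l)) = (pvGB l).2 := by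
  induction l with
  | nil =>
    have h0 : pvFirstIdx ([] : List String) = 0 := rfl
    rw [h0, PySem.List.slice_zero_start, PySem.List.slice_to _ (by omega : (0:Int) ≤ 0)]
    rfl
  | cons x t ih =>
    by_cases hx : pvIsHead x
    · have hm : pvMarks (x :: t) = ((0 : Int), x) :: pvShift (pvMarks t) := by
        rw [pvMarks_cons, if_pos hx]; rfl
      have hf : pvFirstIdx (x :: t) = 0 := by unfold pvFirstIdx; rw [hm]
      rw [hf, PySem.List.slice_zero_start, PySem.List.slice_to _ (by omega : (0:Int) ≤ 0),
        pvGB_cons, if_pos hx]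
      rfl
    · have hm : pvMarks (x :: t) = pvShift (pvMarks t) := by
        rw [pvMarks_cons, if_neg hx, List.nil_append]
      obtain ⟨k, hk⟩ := pvFirstIdx_nat t
      have hf : pvFirstIdx (x :: t) = (k : Int) + 1 := by
        unfold pvFirstIdx at hk ⊢
        rw [hm]
        cases hms : pvMarks t with
        | nil =>
          rw [hms] at hk
          change ((t.length : Nat) : Int) = (k : Int) at hk
          simp only [pvShift, List.map_nil, List.length_cons]
          push_cast
          omega
        | cons mm mr =>
          rw [hms] at hk
          change mm.1 = (k : Int) at hk
          simp only [pvShift, List.map_cons]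
          show mm.1 + 1 = (k : Int) + 1
          omega
      rw [hf, pvSliceZero x t k, ← hk, ih, pvGB_cons, if_neg hx]

theorem pvSlide (x : String) (t : List String) :
    ((pvShift (pvMarks t)).zip (pvBounds (pvShift (pvMarks t)) ((t.length : Int) + 1))).map
        (fun mb => (mb.1.2, PySem.List.slice (x :: t) (some mb.1.1) (some mb.2))) = pvHsec t := by
  have hb : pvBounds (pvShift (pvMarks t)) ((t.length : Int) + 1) =
      (pvBounds (pvMarks t) (t.length : Int)).map (fun b => b + 1) := by
    cases hms : pvMarks t with
    | nil => rfl
    | cons m mr =>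
      simp [pvBounds, pvShift, List.map_map, Function.comp]
  rw [hb]
  unfold pvShift
  rw [List.zip_map, List.map_map]
  unfold pvHsec
  apply List.map_congr_left
  intro mb hmb
  have hm12 := List.of_mem_zip hmb
  obtain ⟨k, hk⟩ := pvMarks_natIdx t mb.1 hm12.1
  have hm2' : ∃ j : Nat, mb.2 = (j : Int) := by
    have hm2 := hm12.2
    unfold pvBounds at hm2
    rcases List.mem_append.mp hm2 with h | h
    · obtain ⟨q, hq, hqe⟩ := List.mem_map.mp h
      obtain ⟨j, hj⟩ := pvMarks_natIdx t q (List.mem_of_mem_tail hq)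
      exact ⟨j, by rw [← hqe, hj]⟩
    · refine ⟨t.length, ?_⟩
      simpa using h
  obtain ⟨j, hj⟩ := hm2'
  show (mb.1.2, PySem.List.slice (x :: t) (some (mb.1.1 + 1)) (some (mb.2 + 1))) =
    (mb.1.2, PySem.List.slice t (some mb.1.1) (some mb.2))
  rw [hk, hj, pvSliceCons]

theorem pvLmain (l : List String) :
    pvHsec l = (pvGB l).1.map (fun sec => (sec.headD "", sec)) := by
  induction l with
  | nil => rfl
  | cons x t ih =>
    have hlen : (((x :: t).length : Nat) : Int) = (t.length : Int) + 1 := by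
      rw [List.length_cons]; push_cast; ring
    by_cases hx : pvIsHead x
    · have hm : pvMarks (x :: t) = ((0 : Int), x) :: pvShift (pvMarks t) := by
        rw [pvMarks_cons, if_pos hx]; rfl
      obtain ⟨k, hk⟩ := pvFirstIdx_nat t
      unfold pvHsec
      rw [hm, hlen]
      have hzip : (((0 : Int), x) :: pvShift (pvMarks t)).zip
            (pvBounds (((0 : Int), x) :: pvShift (pvMarks t)) ((t.length : Int) + 1)) =
          (((0 : Int), x), (k : Int) + 1) ::
            ((pvShift (pvMarks t)).zip (pvBounds (pvShift (pvMarks t)) ((t.length : Int) + 1))) := by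
        unfold pvFirstIdx at hk
        cases hms : pvMarks t with
        | nil =>
          rw [hms] at hk
          change ((t.length : Nat) : Int) = (k : Int) at hk
          simp [pvBounds, pvShift, hk]
        | cons mm mr =>
          rw [hms] at hk
          change mm.1 = (k : Int) at hk
          simp [pvBounds, pvShift, hk]
      rw [hzip, List.map_cons, pvSlide x t, ih]
      show (x, PySem.List.slice (x :: t) (some 0) (some ((k : Int) + 1))) ::
          (pvGB t).1.map (fun sec => (sec.headD "", sec)) = _
      rw [pvSliceZero x t k, ← hk, pvLpre t, pvGB_cons, if_pos hx]
      rfl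
    · have hm : pvMarks (x :: t) = pvShift (pvMarks t) := by
        rw [pvMarks_cons, if_neg hx, List.nil_append]
      unfold pvHsec
      rw [hm, hlen, pvSlide x t, ih, pvGB_cons, if_neg hx]

theorem pvPairsOf_eq (l0 : String) (t : List String) :
    pvPairsOf (l0 :: t) =
      (if (pvGB (l0 :: t)).2 ≠ [] then (pvGB (l0 :: t)).2 :: (pvGB (l0 :: t)).1
        else (pvGB (l0 :: t)).1).map pvPair := by
  have hcomp : ∀ L : List String,
      ((pvMarks L).zip (pvBounds (pvMarks L) (L.length : Int))).map
        (fun mb => (pvKwScore mb.1.2, PySem.Str.join "\n" (PySem.List.slice L (some mb.1.1) (some mb.2)))) =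
      (pvGB L).1.map pvPair := by
    intro L
    have h1 : ((pvMarks L).zip (pvBounds (pvMarks L) (L.length : Int))).map
        (fun mb => (pvKwScore mb.1.2, PySem.Str.join "\n" (PySem.List.slice L (some mb.1.1) (some mb.2)))) =
        (pvHsec L).map (fun p => (pvKwScore p.1, PySem.Str.join "\n" p.2)) := by
      unfold pvHsec
      rw [List.map_map]
      rfl
    rw [h1, pvLmain, List.map_map]
    rfl
  by_cases hx : pvIsHead l0
  · have hm : pvMarks (l0 :: t) = ((0 : Int), l0) :: pvShift (pvMarks t) := by
      rw [pvMarks_cons, if_pos hx]; rfl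
    have hnp : pvNeedPre (pvMarks (l0 :: t)) = false := by rw [hm]; rfl
    have hgb2 : (pvGB (l0 :: t)).2 = [] := by rw [pvGB_cons, if_pos hx]
    simp only [pvPairsOf]
    rw [hnp]
    simp only [Bool.false_eq_true, if_false]
    rw [hcomp (l0 :: t), hgb2]
    simp
  · have hm : pvMarks (l0 :: t) = pvShift (pvMarks t) := by
      rw [pvMarks_cons, if_neg hx, List.nil_append]
    have hget : (PySem.List.pyGet? (l0 :: t) 0).getD "" = l0 := by
      rw [PySem.List.pyGet?_zero_cons]; rfl
    have hnp : pvNeedPre (pvMarks (l0 :: t)) = true := by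
      rw [hm]
      cases hms : pvMarks t with
      | nil => rfl
      | cons mm mr =>
        obtain ⟨k, hk⟩ := pvMarks_natIdx t mm (by rw [hms]; simp)
        simp only [pvShift, List.map_cons, pvNeedPre, decide_eq_true_eq]
        omega
    simp only [pvPairsOf]
    rw [hnp]
    simp only [if_true]
    rw [hget]
    have hzip : ((((0 : Int), l0) :: pvMarks (l0 :: t)).zip
          (pvBounds (((0 : Int), l0) :: pvMarks (l0 :: t)) (((l0 :: t).length : Nat) : Int))) =
        ((((0 : Int), l0), pvFirstIdx (l0 :: t)) ::
          ((pvMarks (l0 :: t)).zip (pvBounds (pvMarks (l0 :: t)) (((l0 :: t).length : Nat) : Int)))) := by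
      cases hmk : pvMarks (l0 :: t) with
      | nil =>
        have hfi : pvFirstIdx (l0 :: t) = (((l0 :: t).length : Nat) : Int) := by
          unfold pvFirstIdx; rw [hmk]
        rw [hfi]
        simp [pvBounds]
      | cons mm mr =>
        have hfi : pvFirstIdx (l0 :: t) = mm.1 := by
          unfold pvFirstIdx; rw [hmk]
        rw [hfi]
        simp [pvBounds]
    rw [hzip, List.map_cons, hcomp (l0 :: t)]
    show (pvKwScore l0,
        PySem.Str.join "\n" (PySem.List.slice (l0 :: t) (some 0) (some (pvFirstIdx (l0 :: t))))) ::
        (pvGB (l0 :: t)).1.map pvPair = _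
    rw [pvLpre (l0 :: t)]
    have hgb2 : (pvGB (l0 :: t)).2 = l0 :: (pvGB t).2 := by rw [pvGB_cons, if_neg hx]
    rw [hgb2]
    simp only [ne_eq, List.cons_ne_nil, not_false_eq_true, if_true, List.map_cons]
    rfl

theorem pvJoin_nil_flatten (qs : List (List Char)) : PySem.Chars.join [] qs = qs.flatten := by
  induction qs with
  | nil => simp [PySem.Chars.join_nil]
  | cons q t ih =>
    cases t with
    | nil => simp [PySem.Chars.join_singleton]
    | cons q' t' => rw [PySem.Chars.join_cons_cons]; simp [ih]

theorem pvCat_toList (picked : List String) :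
    (pvCat picked).toList = (picked.map (fun t => t.toList ++ ("\n\n" : String).toList)).flatten := by
  rw [pvCat, PySem.Str.toList_join]
  rw [show ("" : String).toList = [] from rfl, pvJoin_nil_flatten, List.map_map]
  refine congrArg List.flatten (List.map_congr_left fun t _ => ?_)
  simp [Function.comp, String.toList_append]

theorem pvCutB_nonneg (m : Int) : ∀ (ts : List String) (used : Int), 0 ≤ pvCutB m ts used := by
  intro ts
  induction ts with
  | nil => intro used; simp [pvCutB]
  | cons t ts ih =>
    intro used
    rw [pvCutB]
    split
    · omega
    · have := ih (used + PySem.Str.len t + 2); omega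

theorem pvCat_cons (t : String) (ts : List String) :
    pvCat (t :: ts) = (t ++ "\n\n") ++ pvCat ts := by
  apply String.toList_inj.mp
  rw [String.toList_append, pvCat_toList, pvCat_toList, String.toList_append]
  simp

theorem pvSel_eq (m : Int) : ∀ (ps : List (Int × String)) (r : String),
    pvSelA m ps r =
      r ++ pvCat (PySem.List.slice (ps.map Prod.snd) none
        (some (pvCutB m (ps.map Prod.snd) (PySem.Str.len r)))) := by
  intro ps
  induction ps with
  | nil =>
    intro r
    show r = r ++ pvCat (PySem.List.slice ([] : List String) none (some (pvCutB m [] (PySem.Str.len r))))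
    rw [show pvCutB m [] (PySem.Str.len r) = 0 from rfl,
      PySem.List.slice_to _ (by omega : (0:Int) ≤ 0)]
    simp [pvCat, PySem.Str.join]
  | cons p ps ih =>
    intro r
    rw [List.map_cons]
    show (if PySem.Str.len r + PySem.Str.len p.2 > m then r
        else pvSelA m ps (r ++ p.2 ++ "\n\n")) =
      r ++ pvCat (PySem.List.slice (p.2 :: ps.map Prod.snd) none
        (some (pvCutB m (p.2 :: ps.map Prod.snd) (PySem.Str.len r))))
    rw [pvCutB]
    by_cases hc : PySem.Str.len r + PySem.Str.len p.2 > m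
    · rw [if_pos hc, if_pos hc, PySem.List.slice_to _ (by omega : (0:Int) ≤ 0)]
      simp [pvCat, PySem.Str.join]
    · rw [if_neg hc, if_neg hc, ih (r ++ p.2 ++ "\n\n")]
      have hlen : PySem.Str.len (r ++ p.2 ++ "\n\n") =
          PySem.Str.len r + PySem.Str.len p.2 + 2 := by
        rw [PySem.Str.len_append, PySem.Str.len_append]
        rw [show PySem.Str.len "\n\n" = 2 from by decide]
      rw [hlen]
      have hnn := pvCutB_nonneg m (ps.map Prod.snd) (PySem.Str.len r + PySem.Str.len p.2 + 2)
      have hslice : PySem.List.slice (p.2 :: ps.map Prod.snd) none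
            (some (1 + pvCutB m (ps.map Prod.snd) (PySem.Str.len r + PySem.Str.len p.2 + 2))) =
          p.2 :: PySem.List.slice (ps.map Prod.snd) none
            (some (pvCutB m (ps.map Prod.snd) (PySem.Str.len r + PySem.Str.len p.2 + 2))) := by
        rw [PySem.List.slice_to _ (by omega), PySem.List.slice_to _ (by omega)]
        rw [show (1 + pvCutB m (ps.map Prod.snd) (PySem.Str.len r + PySem.Str.len p.2 + 2)).toNat =
          (pvCutB m (ps.map Prod.snd) (PySem.Str.len r + PySem.Str.len p.2 + 2)).toNat + 1 from by omega]
        rw [List.take_succ_cons]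
      rw [hslice, pvCat_cons, String.append_assoc, String.append_assoc, String.append_assoc]

-- B's stage-3/4 pipeline as single functions, for the final assembly
def pvOrdered (pairs : List (Int × String)) : List String :=
  (PySem.List.pyRange 7 (-1) (-1)).flatMap (fun s => (pairs.filter (fun p => decide (p.1 = s))).map Prod.snd)

def pvJoined (m : Int) (lines : List String) : String :=
  PySem.Str.join "" ((PySem.List.slice (pvOrdered (pvPairsOf lines)) none
    (some (pvCutB m (pvOrdered (pvPairsOf lines)) 0))).map (fun t => t ++ "\n\n"))

-- ===== VERDICT (by name: the statement is the Claim_ definition above) =====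
theorem smart_truncate_readme_py_spec : Claim_equal_smart_truncate_readme_py := by
  unfold Claim_equal_smart_truncate_readme_py
  intro readme max_chars _
  unfold Spec_smart_truncate_readme_py smart_truncate_readme_py smart_truncate_readme_py_alt
  by_cases hle : PySem.Str.len readme ≤ max_chars
  · rw [if_pos hle, if_pos hle]
  · rw [if_neg hle, if_neg hle]
    cases hl : PySem.Str.splitlines readme with
    | nil =>
      simp [pvSelA, PySem.List.sorted]
    | cons l0 t =>
      rw [if_neg (by simp : ¬(l0 :: t = ([] : List String)))]
      show (if pvSelA max_chars (PySem.List.sorted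
            (pvFinish ((l0 :: t).foldl pvStepA ([], [], 0))) (fun x => -x.1) false) "" = "" then
          PySem.Str.slice readme none (some max_chars)
        else pvSelA max_chars (PySem.List.sorted
            (pvFinish ((l0 :: t).foldl pvStepA ([], [], 0))) (fun x => -x.1) false) "") =
        (if pvJoined max_chars (l0 :: t) = "" then PySem.Str.slice readme none (some max_chars)
          else pvJoined max_chars (l0 :: t))
      have h1 : pvFinish ((l0 :: t).foldl pvStepA ([], [], 0)) = pvPairsOf (l0 :: t) := by
        rw [pvScored_eq, pvPairsOf_eq]
      have hks : ([7, 6, 5, 4, 3, 2, 1, 0] : List Int).Pairwise (fun a b => b < a) := by decide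
      have hmem : ∀ p ∈ pvPairsOf (l0 :: t), p.1 ∈ ([7, 6, 5, 4, 3, 2, 1, 0] : List Int) := by
        intro p hp
        rw [pvPairsOf_eq] at hp
        obtain ⟨sec, _, rfl⟩ := List.mem_map.mp hp
        exact pvKwScore_mem _
      have h2 : PySem.List.sorted (pvPairsOf (l0 :: t)) (fun x => -x.1) false =
          pvBk [7, 6, 5, 4, 3, 2, 1, 0] (pvPairsOf (l0 :: t)) :=
        pvSorted_eq_bk _ hks _ hmem
      have hord : (pvBk [7, 6, 5, 4, 3, 2, 1, 0] (pvPairsOf (l0 :: t))).map Prod.snd =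
          pvOrdered (pvPairsOf (l0 :: t)) := by
        unfold pvBk pvOrdered
        rw [show PySem.List.pyRange 7 (-1) (-1) = [7, 6, 5, 4, 3, 2, 1, 0] from by decide]
        rw [List.map_flatMap]
      have h3 : pvSelA max_chars (pvBk [7, 6, 5, 4, 3, 2, 1, 0] (pvPairsOf (l0 :: t))) "" =
          pvJoined max_chars (l0 :: t) := by
        rw [pvSel_eq, show PySem.Str.len "" = 0 from rfl, hord]
        show "" ++ pvCat (PySem.List.slice (pvOrdered (pvPairsOf (l0 :: t))) none
          (some (pvCutB max_chars (pvOrdered (pvPairsOf (l0 :: t))) 0))) = pvJoined max_chars (l0 :: t)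
        simp [pvJoined, pvCat]
      rw [h1, h2, h3]
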